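-- pv_equiv track=rewrite | github.com/GPlaczek/wd_helpers | votes.py | condorcet
-- ===== SOURCE A (Python) =====
-- def condorcet(lineups, variants):
--     duels = {i: {x: 0 for x in variants} for i in variants}
--     for base in variants:
--         for (key, val) in lineups.items():
--             pos = key.find(base)
--             for compare in variants:
--                 pos1 = key.find(compare)
--                 if pos < pos1: duels[base][compare] += val
--     return duels
-- ===== SOURCE B (Python) =====
-- def condorcet(lineups, variants):
--     duels = {b: {c: 0 for c in variants} for b in variants}
--     for key, val in lineups.items():
--         rest = sorted(variants, key=key.find)
--         while rest:
--             group = [v for v in rest if key.find(v) == key.find(rest[0])]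
--             rest = rest[len(group):]
--             for b in group:
--                 for c in rest:
--                     duels[b][c] += val
--     return duels
-- ===== Notes on version B (the rewrite author's own statement) =====
-- stated objective: faster
-- what changed: B converts each ballot into a ranking once: it sorts the variants by their find-position in the key, splits the sorted list into tie-groups of equal position, and pours the ballot's weight from every member of a group to every variant in strictly later groups, instead of A's triple loop that re-runs key.find for every (base, ballot, compare) triple.
import Mathlib
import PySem

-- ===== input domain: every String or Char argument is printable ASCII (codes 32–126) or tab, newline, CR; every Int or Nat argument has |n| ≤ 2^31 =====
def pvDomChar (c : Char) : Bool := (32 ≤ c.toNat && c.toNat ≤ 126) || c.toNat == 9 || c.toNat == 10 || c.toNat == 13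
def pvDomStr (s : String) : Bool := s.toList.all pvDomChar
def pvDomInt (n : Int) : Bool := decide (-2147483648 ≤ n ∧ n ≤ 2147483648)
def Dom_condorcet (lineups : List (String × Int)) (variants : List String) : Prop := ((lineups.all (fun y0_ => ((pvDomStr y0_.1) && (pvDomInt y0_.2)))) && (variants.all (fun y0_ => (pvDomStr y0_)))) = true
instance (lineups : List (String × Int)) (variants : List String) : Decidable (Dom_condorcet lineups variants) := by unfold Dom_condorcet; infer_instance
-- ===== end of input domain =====

-- B turns each ballot into a ranking: sort the variants by find-position once, split into
-- tie-groups, and pour the ballot's weight from each group to all later groups — instead of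
-- A's triple loop that re-runs key.find for every (base, ballot, compare) triple.

-- ===== PORT A =====
def condorcet (lineups : List (String × Int)) (variants : List String) : List (String × List (String × Int)) :=
  -- duels = {i: {x: 0 for x in variants} for i in variants}
  let duels0 : PySem.Dict String (PySem.Dict String Int) :=
    variants.foldl (fun d i =>
      d.insert i (variants.foldl (fun d2 x => d2.insert x 0) PySem.Dict.empty)) PySem.Dict.empty
  -- for base in variants: for (key, val) in lineups.items(): pos = key.find(base); for compare in variants: …
  let duels := variants.foldl (fun duels base =>
    (PySem.Dict.ofList lineups).items.foldl (fun duels kv =>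
      let pos := PySem.Str.find kv.1 base
      variants.foldl (fun duels compare =>
        let pos1 := PySem.Str.find kv.1 compare
        if pos < pos1 then
          duels.modify base PySem.Dict.empty (fun row => row.modify compare 0 (· + kv.2))
        else duels) duels) duels) duels0
  duels.items.map (fun p => (p.1, p.2.items))

-- ===== PORT B =====
-- the while loop of Source B: while rest: group = [v for v in rest if key.find(v) == key.find(rest[0])];
--   rest = rest[len(group):]; for b in group: for c in rest: duels[b][c] += val
def condGroups (k : String) (v : Int) : List String → PySem.Dict String (PySem.Dict String Int) → PySem.Dict String (PySem.Dict String Int)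
  | [], d => d
  | r :: t, d =>
    let group := (r :: t).filter (fun x => PySem.Str.find k x == PySem.Str.find k r)
    let rest' := (r :: t).drop group.length
    condGroups k v rest'
      (group.foldl (fun d b => rest'.foldl (fun d c =>
        d.modify b PySem.Dict.empty (fun row => row.modify c 0 (· + v))) d) d)
termination_by rest _ => rest.length
decreasing_by
  have hr : r ∈ (r :: t).filter (fun x => PySem.Str.find k x == PySem.Str.find k r) :=
    List.mem_filter.mpr ⟨List.mem_cons_self, by simp⟩
  have := List.length_pos_of_mem hr
  simp only [List.length_drop, List.length_cons]
  omega

def condorcet_alt (lineups : List (String × Int)) (variants : List String) : List (String × List (String × Int)) :=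
  -- duels = {b: {c: 0 for c in variants} for b in variants}
  let duels0 : PySem.Dict String (PySem.Dict String Int) :=
    variants.foldl (fun d b =>
      d.insert b (variants.foldl (fun d2 c => d2.insert c 0) PySem.Dict.empty)) PySem.Dict.empty
  -- for key, val in lineups.items(): rest = sorted(variants, key=key.find); while rest: …
  let duels := (PySem.Dict.ofList lineups).items.foldl (fun duels kv =>
    condGroups kv.1 kv.2 (PySem.List.sorted variants (fun x => PySem.Str.find kv.1 x) false) duels) duels0
  duels.items.map (fun p => (p.1, p.2.items))

-- ===== PRECONDITION & SPEC =====
def Spec_condorcet (lineups : List (String × Int)) (variants : List String) (out : List (String × List (String × Int))) : Prop := out = condorcet_alt lineups variants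
instance (lineups : List (String × Int)) (variants : List String) (out : List (String × List (String × Int))) : Decidable (Spec_condorcet lineups variants out) := by unfold Spec_condorcet; infer_instance

-- ===== CLAIM (what is proved, stated in full; the proofs are below) =====
def Claim_equal_condorcet : Prop := ∀ (lineups : List (String × Int)) (variants : List String), Dom_condorcet lineups variants → Spec_condorcet lineups variants (condorcet lineups variants)

-- ===== LEMMAS AND PROOFS =====

-- unfolding equations of the well-founded `condGroups`
theorem condGroups_nil (k : String) (v : Int) (d : PySem.Dict String (PySem.Dict String Int)) :
    condGroups k v [] d = d := by
  rw [condGroups.eq_def]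

theorem condGroups_cons (k : String) (v : Int) (r : String) (t : List String)
    (d : PySem.Dict String (PySem.Dict String Int)) :
    condGroups k v (r :: t) d =
      condGroups k v
        ((r :: t).drop ((r :: t).filter (fun x => PySem.Str.find k x == PySem.Str.find k r)).length)
        (((r :: t).filter (fun x => PySem.Str.find k x == PySem.Str.find k r)).foldl (fun d b =>
          ((r :: t).drop ((r :: t).filter (fun x => PySem.Str.find k x == PySem.Str.find k r)).length).foldl
            (fun d c => d.modify b PySem.Dict.empty (fun row => row.modify c 0 (· + v))) d) d) := by
  rw [condGroups.eq_def]

-- the shared update `duels[b][c] += val`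
def pvBump (d : PySem.Dict String (PySem.Dict String Int)) (b c : String) (v : Int) :
    PySem.Dict String (PySem.Dict String Int) :=
  d.modify b PySem.Dict.empty (fun row => row.modify c 0 (· + v))

-- A's guarded step: `if key.find(b) < key.find(c): duels[b][c] += v`
def pvStep (k : String) (v : Int) (b : String) (d : PySem.Dict String (PySem.Dict String Int))
    (c : String) : PySem.Dict String (PySem.Dict String Int) :=
  if PySem.Str.find k b < PySem.Str.find k c then pvBump d b c v else d

def pvInit (variants : List String) : PySem.Dict String (PySem.Dict String Int) :=
  variants.foldl (fun d i =>
    d.insert i (variants.foldl (fun d2 x => d2.insert x 0) PySem.Dict.empty)) PySem.Dict.empty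

def pvInner (variants : List String) : PySem.Dict String Int :=
  variants.foldl (fun d2 x => d2.insert x 0) PySem.Dict.empty

-- current cell value duels[b][c]
def pvVal (d : PySem.Dict String (PySem.Dict String Int)) (b c : String) : Int :=
  (d.getD b PySem.Dict.empty).getD c 0

-- multiplicity of x in l, as an Int-valued 0/1 sum
def pvCnt (l : List String) (x : String) : Int :=
  (l.map (fun y => if y = x then (1 : Int) else 0)).sum

-- total weight of lineups whose key places b strictly before c
def pvWgt (items : List (String × Int)) (b c : String) : Int :=
  (items.map (fun kv => if PySem.Str.find kv.1 b < PySem.Str.find kv.1 c then kv.2 else 0)).sum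

-- ---- the two ports, re-expressed through the shared helpers ----

theorem condorcet_eq (lineups : List (String × Int)) (variants : List String) :
    condorcet lineups variants =
      ((variants.foldl (fun d b =>
          (PySem.Dict.ofList lineups).items.foldl (fun d kv =>
            variants.foldl (pvStep kv.1 kv.2 b) d) d) (pvInit variants)).items).map
        (fun p => (p.1, p.2.items)) := rfl

theorem condorcet_alt_eq (lineups : List (String × Int)) (variants : List String) :
    condorcet_alt lineups variants =
      (((PySem.Dict.ofList lineups).items.foldl (fun d kv =>
          condGroups kv.1 kv.2 (PySem.List.sorted variants (fun x => PySem.Str.find kv.1 x) false) d)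
        (pvInit variants)).items).map (fun p => (p.1, p.2.items)) := rfl

-- ---- cell-value bookkeeping ----

theorem pvCnt_cons (x : String) (l : List String) (X : String) :
    pvCnt (x :: l) X = (if x = X then (1 : Int) else 0) + pvCnt l X := by
  simp [pvCnt]

theorem pvCnt_eq_zero (l : List String) (X : String) (h : X ∉ l) : pvCnt l X = 0 := by
  induction l with
  | nil => simp [pvCnt]
  | cons y l ih =>
    rw [pvCnt_cons, ih (fun hm => h (List.mem_cons_of_mem _ hm))]
    have : ¬ y = X := fun hy => h (hy ▸ List.mem_cons_self)
    simp [this]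

theorem pvCnt_mem_of_ne_zero (l : List String) (X : String) (h : pvCnt l X ≠ 0) : X ∈ l := by
  by_contra hm; exact h (pvCnt_eq_zero l X hm)

theorem pvCnt_filter_split (p : String → Bool) (l : List String) (X : String) :
    pvCnt l X = pvCnt (l.filter p) X + pvCnt (l.filter (fun x => !(p x))) X := by
  induction l with
  | nil => simp [pvCnt]
  | cons x l ih =>
    by_cases hx : p x
    · simp only [List.filter_cons, hx, Bool.not_true, if_true, Bool.false_eq_true, if_false,
        pvCnt_cons]
      rw [ih]; ring
    · have hx' : p x = false := by simpa using hx
      simp only [List.filter_cons, hx', Bool.not_false, if_true, Bool.false_eq_true, if_false,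
        pvCnt_cons]
      rw [ih]; ring

theorem pvCnt_perm (l l' : List String) (h : l.Perm l') (X : String) :
    pvCnt l X = pvCnt l' X := by
  unfold pvCnt
  exact List.Perm.sum_eq (h.map _)

theorem pvVal_bump (d : PySem.Dict String (PySem.Dict String Int)) (b c B C : String) (v : Int) :
    pvVal (pvBump d b c v) B C = pvVal d B C + (if B = b ∧ C = c then v else 0) := by
  unfold pvVal pvBump
  by_cases hB : B = b
  · subst hB
    rw [PySem.Dict.getD_modify_self]
    by_cases hC : C = c
    · subst hC; rw [PySem.Dict.getD_modify_self]; simp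
    · rw [PySem.Dict.getD_modify_of_ne _ _ _ hC]; simp [hC]
  · rw [PySem.Dict.getD_modify_of_ne _ _ _ hB]; simp [hB]

-- A's inner loop over `compare`
theorem pvVal_innerFold (vs : List String) (k : String) (v : Int) (b B C : String) :
    ∀ d, pvVal (vs.foldl (pvStep k v b) d) B C
      = pvVal d B C +
        (if B = b ∧ PySem.Str.find k B < PySem.Str.find k C then pvCnt vs C * v else 0) := by
  induction vs with
  | nil => intro d; simp [pvCnt]
  | cons c vs ih =>
    intro d
    rw [List.foldl_cons, ih]
    have hstep : pvVal (pvStep k v b d c) B C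
        = pvVal d B C + (if PySem.Str.find k b < PySem.Str.find k c then
            (if B = b ∧ C = c then v else 0) else 0) := by
      unfold pvStep
      by_cases hp : PySem.Str.find k b < PySem.Str.find k c
      · rw [if_pos hp, pvVal_bump, if_pos hp]
      · rw [if_neg hp, if_neg hp]; ring
    rw [hstep, pvCnt_cons]
    by_cases hb : B = b
    · by_cases hc : C = c
      · simp only [hb, hc, eq_self_iff_true, true_and, and_true, and_self, false_and, and_false, if_true, if_false, ite_self]
        (try split_ifs) <;> ring
      · have hc' : ¬ c = C := fun h => hc h.symm
        simp only [hb, hc, hc', eq_self_iff_true, true_and, and_true, and_self, false_and, and_false, if_true, if_false, ite_self]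
        (try split_ifs) <;> ring
    · simp only [hb, eq_self_iff_true, true_and, and_true, and_self, false_and, and_false, if_true, if_false, ite_self]
      (try split_ifs) <;> ring

theorem pvVal_midA (items : List (String × Int)) (vs : List String) (b B C : String) :
    ∀ d, pvVal (items.foldl (fun d kv => vs.foldl (pvStep kv.1 kv.2 b) d) d) B C
      = pvVal d B C + (if B = b then pvCnt vs C * pvWgt items B C else 0) := by
  induction items with
  | nil => intro d; simp [pvWgt]
  | cons kv items ih =>
    intro d
    rw [List.foldl_cons, ih, pvVal_innerFold]
    have hw : pvWgt (kv :: items) B C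
        = (if PySem.Str.find kv.1 B < PySem.Str.find kv.1 C then kv.2 else 0) + pvWgt items B C := by
      simp [pvWgt]
    rw [hw]
    by_cases hb : B = b
    · simp only [hb, eq_self_iff_true, true_and, and_true, and_self, false_and, and_false, if_true, if_false, ite_self]
      (try split_ifs) <;> ring
    · simp only [hb, eq_self_iff_true, true_and, and_true, and_self, false_and, and_false, if_true, if_false, ite_self]
      (try split_ifs) <;> ring

theorem pvVal_A (vs' vs : List String) (items : List (String × Int)) (B C : String) :
    ∀ d, pvVal (vs'.foldl (fun d b => items.foldl (fun d kv => vs.foldl (pvStep kv.1 kv.2 b) d) d) d) B C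
      = pvVal d B C + pvCnt vs' B * (pvCnt vs C * pvWgt items B C) := by
  induction vs' with
  | nil => intro d; simp [pvCnt]
  | cons b vs' ih =>
    intro d
    rw [List.foldl_cons, ih, pvVal_midA, pvCnt_cons]
    by_cases hb : b = B
    · have hb' : B = b := hb.symm
      simp only [hb', eq_self_iff_true, true_and, and_true, and_self, false_and, and_false, if_true, if_false, ite_self]
      ring
    · have hb' : ¬ B = b := fun h => hb h.symm
      simp only [hb, hb', eq_self_iff_true, true_and, and_true, and_self, false_and, and_false, if_true, if_false, ite_self]
      ring

-- ---- B's group-to-rest pour, cell by cell ----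

theorem pvVal_rowFold (rest' : List String) (b B C : String) (v : Int) :
    ∀ d, pvVal (rest'.foldl (fun d c => pvBump d b c v) d) B C
      = pvVal d B C + (if B = b then pvCnt rest' C * v else 0) := by
  induction rest' with
  | nil => intro d; simp [pvCnt]
  | cons c rest' ih =>
    intro d
    rw [List.foldl_cons, ih, pvVal_bump, pvCnt_cons]
    by_cases hb : B = b
    · subst hb
      by_cases hc : C = c
      · subst hc; simp; ring
      · have hc' : ¬ c = C := fun h => hc h.symm
        simp [hc, hc']
    · simp [hb]

theorem pvVal_groupFold (group rest' : List String) (B C : String) (v : Int) :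
    ∀ d, pvVal (group.foldl (fun d b => rest'.foldl (fun d c => pvBump d b c v) d) d) B C
      = pvVal d B C + pvCnt group B * (pvCnt rest' C * v) := by
  induction group with
  | nil => intro d; simp [pvCnt]
  | cons b group ih =>
    intro d
    rw [List.foldl_cons, ih, pvVal_rowFold, pvCnt_cons]
    by_cases hb : B = b
    · subst hb; simp; ring
    · have hb' : ¬ b = B := fun h => hb h.symm
      simp [hb, hb']

-- in a key-sorted list whose head realises the minimum key value m, dropping the elements with
-- key = m (a prefix) leaves exactly the elements with key ≠ m
theorem pv_drop_filter_sorted (key : String → Int) :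
    ∀ (l : List String), l.Pairwise (fun a b => key a ≤ key b) → ∀ m : Int, (∀ x ∈ l, m ≤ key x) →
      l.drop ((l.filter (fun x => key x == m)).length) = l.filter (fun x => !(key x == m)) := by
  intro l
  induction l with
  | nil => intro _ m _; simp
  | cons x t ih =>
    intro hp m hm
    obtain ⟨hx, ht⟩ := List.pairwise_cons.mp hp
    by_cases h : key x = m
    · have hb : (key x == m) = true := by simpa using h
      simp only [List.filter_cons, hb, Bool.not_true, if_true, List.length_cons,
        List.drop_succ_cons]
      exact ih ht m (fun y hy => hm y (List.mem_cons_of_mem _ hy))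
    · have hlt : m < key x := lt_of_le_of_ne (hm x List.mem_cons_self) (fun e => h e.symm)
      have hall : ∀ y ∈ x :: t, (key y == m) = false := by
        intro y hy
        rcases List.mem_cons.mp hy with hy | hy
        · subst hy
          exact beq_eq_false_iff_ne.mpr h
        · have hy' : m < key y := lt_of_lt_of_le hlt (hx y hy)
          exact beq_eq_false_iff_ne.mpr (by omega)
      have hnil : (x :: t).filter (fun x => key x == m) = [] :=
        List.filter_eq_nil_iff.mpr (fun y hy => by rw [hall y hy]; exact Bool.false_ne_true)
      have hself : (x :: t).filter (fun x => !(key x == m)) = x :: t :=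
        List.filter_eq_self.mpr (fun y hy => by rw [hall y hy]; rfl)
      rw [hnil, hself]
      simp

theorem pvVal_condGroups (k : String) (v : Int) (B C : String) :
    ∀ n (rest : List String), rest.length ≤ n →
      rest.Pairwise (fun a b => PySem.Str.find k a ≤ PySem.Str.find k b) →
      ∀ d, pvVal (condGroups k v rest d) B C
        = pvVal d B C + (if PySem.Str.find k B < PySem.Str.find k C then
            pvCnt rest B * (pvCnt rest C * v) else 0) := by
  intro n
  induction n with
  | zero =>
    intro rest hlen _ d
    have hnil : rest = [] := List.eq_nil_of_length_eq_zero (Nat.le_zero.mp hlen)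
    subst hnil
    rw [condGroups_nil]
    simp [pvCnt]
  | succ n ih =>
    intro rest hlen hp d
    match rest, hlen, hp with
    | [], _, _ =>
      rw [condGroups_nil]
      simp [pvCnt]
    | r :: t, hlen, hp =>
      rw [condGroups_cons]
      set group := (r :: t).filter (fun x => PySem.Str.find k x == PySem.Str.find k r) with hgroup
      set rest' := (r :: t).drop group.length with hrest'
      have hmin : ∀ x ∈ r :: t, PySem.Str.find k r ≤ PySem.Str.find k x := by
        intro x hx
        rcases List.mem_cons.mp hx with hx | hx
        · subst hx; exact le_refl _
        · exact (List.pairwise_cons.mp hp).1 x hx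
      have hdropeq : rest' = (r :: t).filter (fun x => !(PySem.Str.find k x == PySem.Str.find k r)) := by
        rw [hrest', hgroup]
        exact pv_drop_filter_sorted (fun x => PySem.Str.find k x) (r :: t) hp
          (PySem.Str.find k r) hmin
      have hrlen : rest'.length ≤ n := by
        have hr : r ∈ group := by
          rw [hgroup]; exact List.mem_filter.mpr ⟨List.mem_cons_self, by simp⟩
        have h1 := List.length_pos_of_mem hr
        have h2 : rest'.length = (r :: t).length - group.length := by
          rw [hrest', List.length_drop]
        simp only [List.length_cons] at h2 hlen
        omega
      have hp' : rest'.Pairwise (fun a b => PySem.Str.find k a ≤ PySem.Str.find k b) := by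
        rw [hrest']
        exact List.Pairwise.sublist (List.drop_sublist _ _) hp
      have hfun : (fun (d : PySem.Dict String (PySem.Dict String Int)) (b : String) =>
            rest'.foldl (fun d c =>
              d.modify b PySem.Dict.empty (fun row => row.modify c 0 (· + v))) d)
          = fun d b => rest'.foldl (fun d c => pvBump d b c v) d := rfl
      rw [hfun, ih rest' hrlen hp', pvVal_groupFold]
      have hsplit_B : pvCnt (r :: t) B = pvCnt group B + pvCnt rest' B := by
        rw [hgroup, hdropeq]; exact pvCnt_filter_split _ _ _
      have hsplit_C : pvCnt (r :: t) C = pvCnt group C + pvCnt rest' C := by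
        rw [hgroup, hdropeq]; exact pvCnt_filter_split _ _ _
      have hgrp_key : ∀ X : String, pvCnt group X ≠ 0 →
          PySem.Str.find k X = PySem.Str.find k r := by
        intro X hX
        have hm := pvCnt_mem_of_ne_zero _ _ hX
        rw [hgroup] at hm
        have := (List.mem_filter.mp hm).2
        simpa using this
      have hrest_key : ∀ X : String, pvCnt rest' X ≠ 0 →
          PySem.Str.find k r < PySem.Str.find k X := by
        intro X hX
        have hm := pvCnt_mem_of_ne_zero _ _ hX
        rw [hdropeq] at hm
        have hne : ¬ PySem.Str.find k X = PySem.Str.find k r := by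
          have := (List.mem_filter.mp hm).2
          simpa using this
        exact lt_of_le_of_ne (hmin X (List.mem_of_mem_filter hm)) (fun e => hne e.symm)
      rw [hsplit_B, hsplit_C]
      by_cases hlt : PySem.Str.find k B < PySem.Str.find k C
      · rw [if_pos hlt, if_pos hlt]
        by_cases hgc : pvCnt group C = 0
        · rw [hgc]
          by_cases hgb : pvCnt group B = 0
          · rw [hgb]; ring
          · have hB := hgrp_key B hgb
            by_cases hrb : pvCnt rest' B = 0
            · rw [hrb]; ring
            · exact absurd (hB ▸ hrest_key B hrb) (lt_irrefl _)
        · have hC := hgrp_key C hgc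
          have hgb : pvCnt group B = 0 := by
            by_contra hgb
            have hB := hgrp_key B hgb
            rw [hB, hC] at hlt; exact lt_irrefl _ hlt
          have hrb : pvCnt rest' B = 0 := by
            by_contra hrb
            have h1 := hrest_key B hrb
            rw [← hC] at h1
            exact absurd (lt_trans hlt h1) (lt_irrefl _)
          rw [hgb, hrb]; ring
      · rw [if_neg hlt, if_neg hlt]
        by_cases hgb : pvCnt group B = 0
        · rw [hgb]; ring
        · have hB := hgrp_key B hgb
          have hrc : pvCnt rest' C = 0 := by
            by_contra hrc
            exact hlt (hB ▸ hrest_key C hrc)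
          rw [hrc]; ring

-- B's outer loop over the lineups
theorem pvVal_B (vs : List String) (B C : String) :
    ∀ (items : List (String × Int)) d,
      pvVal (items.foldl (fun d kv =>
          condGroups kv.1 kv.2 (PySem.List.sorted vs (fun x => PySem.Str.find kv.1 x) false) d) d) B C
        = pvVal d B C + pvCnt vs B * (pvCnt vs C * pvWgt items B C) := by
  intro items
  induction items with
  | nil => intro d; simp [pvWgt]
  | cons kv items ih =>
    intro d
    set srt := PySem.List.sorted vs (fun x => PySem.Str.find kv.1 x) false with hsrt
    rw [List.foldl_cons, ih,
      pvVal_condGroups kv.1 kv.2 B C srt.length srt (le_refl _)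
        (PySem.List.sorted_pairwise vs (fun x => PySem.Str.find kv.1 x))]
    have hperm : srt.Perm vs := PySem.List.sorted_perm vs _ false
    rw [pvCnt_perm srt vs hperm B, pvCnt_perm srt vs hperm C]
    have hw : pvWgt (kv :: items) B C
        = (if PySem.Str.find kv.1 B < PySem.Str.find kv.1 C then kv.2 else 0) + pvWgt items B C := by
      simp [pvWgt]
    rw [hw]
    (try split_ifs) <;> ring

-- ---- shape bookkeeping: the key structure of duels never changes after initialisation ----

def pvShape (vs : List String) (d : PySem.Dict String (PySem.Dict String Int)) : Prop :=
  d.keys = (pvInit vs).keys ∧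
    ∀ x : String, (d.getD x PySem.Dict.empty).keys = ((pvInit vs).getD x PySem.Dict.empty).keys

theorem pv_contains_foldl_insert {ν : Type} (l : List String) (w : ν)
    (d : PySem.Dict String ν) (x : String) :
    (l.foldl (fun d y => d.insert y w) d).contains x = (x ∈ l || d.contains x) := by
  induction l generalizing d with
  | nil => simp
  | cons y l ih =>
    rw [List.foldl_cons, ih, PySem.Dict.contains_insert]
    by_cases hx : x = y
    · simp [hx]
    · have : (x == y) = false := beq_eq_false_iff_ne.mpr hx
      simp [hx, this]

theorem pv_getD_foldl_insert_const {ν : Type} (l : List String) (w dflt : ν)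
    (d : PySem.Dict String ν) (x : String) :
    (l.foldl (fun d y => d.insert y w) d).getD x dflt
      = if x ∈ l then w else d.getD x dflt := by
  induction l generalizing d with
  | nil => simp
  | cons y l ih =>
    rw [List.foldl_cons, ih]
    by_cases hl : x ∈ l
    · simp [hl]
    · by_cases hx : x = y <;> simp [hl, hx, PySem.Dict.getD_insert]

theorem pvInit_contains (vs : List String) (x : String) (hx : x ∈ vs) :
    (pvInit vs).contains x = true := by
  unfold pvInit
  rw [pv_contains_foldl_insert]
  simp [hx]

theorem pvInit_getD (vs : List String) (x : String) :
    (pvInit vs).getD x PySem.Dict.empty = if x ∈ vs then pvInner vs else PySem.Dict.empty := by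
  unfold pvInit pvInner
  rw [pv_getD_foldl_insert_const]
  simp

theorem pvInner_contains (vs : List String) (x : String) (hx : x ∈ vs) :
    (pvInner vs).contains x = true := by
  unfold pvInner
  rw [pv_contains_foldl_insert]
  simp [hx]

theorem pvShape_bump (vs : List String) (d : PySem.Dict String (PySem.Dict String Int))
    (b c : String) (v : Int) (hb : b ∈ vs) (hc : c ∈ vs) (h : pvShape vs d) :
    pvShape vs (pvBump d b c v) := by
  obtain ⟨hk, hin⟩ := h
  have hdb : d.contains b = true := by
    rw [PySem.Dict.contains_iff_mem_keys, hk, ← PySem.Dict.contains_iff_mem_keys]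
    exact pvInit_contains vs b hb
  have hrowc : (d.getD b PySem.Dict.empty).contains c = true := by
    rw [PySem.Dict.contains_iff_mem_keys, hin b, pvInit_getD, if_pos hb,
      ← PySem.Dict.contains_iff_mem_keys]
    exact pvInner_contains vs c hc
  constructor
  · unfold pvBump
    rw [PySem.Dict.keys_modify, PySem.Dict.keys_insert_of_contains _ _ hdb, hk]
  · intro x
    unfold pvBump
    by_cases hx : x = b
    · subst hx
      rw [PySem.Dict.getD_modify_self, PySem.Dict.keys_modify,
        PySem.Dict.keys_insert_of_contains _ _ hrowc, hin x]
    · rw [PySem.Dict.getD_modify_of_ne _ _ _ hx, hin x]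

theorem pvShape_foldl {α : Type} (vs : List String) (L : List α)
    (g : PySem.Dict String (PySem.Dict String Int) → α → PySem.Dict String (PySem.Dict String Int))
    (hg : ∀ d a, a ∈ L → pvShape vs d → pvShape vs (g d a)) :
    ∀ d, pvShape vs d → pvShape vs (L.foldl g d) := by
  induction L with
  | nil => intro d h; exact h
  | cons a L ih =>
    intro d h
    rw [List.foldl_cons]
    exact ih (fun d a' ha' => hg d a' (List.mem_cons_of_mem _ ha')) _
      (hg d a (List.mem_cons_self) h)

theorem pvShape_step (vs : List String) (k : String) (v : Int) (b : String) (hb : b ∈ vs)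
    (d : PySem.Dict String (PySem.Dict String Int)) (c : String) (hc : c ∈ vs)
    (h : pvShape vs d) : pvShape vs (pvStep k v b d c) := by
  unfold pvStep
  by_cases hp : PySem.Str.find k b < PySem.Str.find k c
  · rw [if_pos hp]; exact pvShape_bump vs d b c v hb hc h
  · rw [if_neg hp]; exact h

theorem pvShape_A (vs : List String) (items : List (String × Int)) :
    pvShape vs (vs.foldl (fun d b => items.foldl (fun d kv => vs.foldl (pvStep kv.1 kv.2 b) d) d)
      (pvInit vs)) := by
  apply pvShape_foldl vs vs _ ?_ _ ⟨rfl, fun _ => rfl⟩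
  intro d b hb hd
  apply pvShape_foldl vs items _ ?_ _ hd
  intro d' kv _ hd'
  exact pvShape_foldl vs vs _ (fun d'' c hc => pvShape_step vs kv.1 kv.2 b hb d'' c hc) _ hd'

theorem pvShape_condGroups (vs : List String) (k : String) (v : Int) :
    ∀ n (rest : List String), rest.length ≤ n → (∀ x ∈ rest, x ∈ vs) →
      ∀ d, pvShape vs d → pvShape vs (condGroups k v rest d) := by
  intro n
  induction n with
  | zero =>
    intro rest hlen _ d hd
    have hnil : rest = [] := List.eq_nil_of_length_eq_zero (Nat.le_zero.mp hlen)
    subst hnil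
    rw [condGroups_nil]; exact hd
  | succ n ih =>
    intro rest hlen hmem d hd
    match rest, hlen, hmem with
    | [], _, _ =>
      rw [condGroups_nil]; exact hd
    | r :: t, hlen, hmem =>
      rw [condGroups_cons]
      set group := (r :: t).filter (fun x => PySem.Str.find k x == PySem.Str.find k r) with hgroup
      set rest' := (r :: t).drop group.length with hrest'
      have hgmem : ∀ x ∈ group, x ∈ vs := by
        intro x hx
        rw [hgroup] at hx
        exact hmem x (List.mem_of_mem_filter hx)
      have hrmem : ∀ x ∈ rest', x ∈ vs := by
        intro x hx
        rw [hrest'] at hx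
        exact hmem x (List.Sublist.mem hx (List.drop_sublist _ _))
      have hrlen : rest'.length ≤ n := by
        have hr : r ∈ group := by
          rw [hgroup]; exact List.mem_filter.mpr ⟨List.mem_cons_self, by simp⟩
        have h1 := List.length_pos_of_mem hr
        have h2 : rest'.length = (r :: t).length - group.length := by
          rw [hrest', List.length_drop]
        simp only [List.length_cons] at h2 hlen
        omega
      apply ih rest' hrlen hrmem
      apply pvShape_foldl vs group _ ?_ _ hd
      intro d' b hb hd'
      apply pvShape_foldl vs rest' _ ?_ _ hd'
      intro d'' c hc hd''
      exact pvShape_bump vs d'' b c v (hgmem b hb) (hrmem c hc) hd''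

theorem pvShape_Bfold (vs : List String) (items : List (String × Int)) :
    pvShape vs (items.foldl (fun d kv =>
      condGroups kv.1 kv.2 (PySem.List.sorted vs (fun x => PySem.Str.find kv.1 x) false) d)
      (pvInit vs)) := by
  apply pvShape_foldl vs items _ ?_ _ ⟨rfl, fun _ => rfl⟩
  intro d kv _ hd
  exact pvShape_condGroups vs kv.1 kv.2 _ _ (le_refl _)
    (fun x hx => (PySem.List.mem_sorted _ _ _ _).mp hx) d hd

theorem pvInit_nodup_keys (vs : List String) : (pvInit vs).keys.Nodup := by
  unfold pvInit
  exact PySem.Dict.nodup_keys_foldl_insert _ _ _ PySem.Dict.nodup_keys_empty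

theorem pvInit_getD_nodup_keys (vs : List String) (x : String) :
    ((pvInit vs).getD x PySem.Dict.empty).keys.Nodup := by
  rw [pvInit_getD]
  by_cases hx : x ∈ vs
  · rw [if_pos hx]
    unfold pvInner
    exact PySem.Dict.nodup_keys_foldl_insert _ _ _ PySem.Dict.nodup_keys_empty
  · rw [if_neg hx]
    simp [PySem.Dict.keys_empty]

-- items of a shaped dict, fully determined by its keys and its cell values
theorem pv_items_of_shape (vs : List String) (d : PySem.Dict String (PySem.Dict String Int))
    (h : pvShape vs d) :
    d.items.map (fun p => (p.1, p.2.items))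
      = (pvInit vs).keys.map (fun b =>
          (b, ((pvInit vs).getD b PySem.Dict.empty).keys.map (fun c => (c, pvVal d b c)))) := by
  obtain ⟨hk, hin⟩ := h
  have hnd : d.keys.Nodup := hk ▸ pvInit_nodup_keys vs
  rw [PySem.Dict.items_eq_map_keys d hnd PySem.Dict.empty, List.map_map, hk]
  apply List.map_congr_left
  intro b _
  simp only [Function.comp]
  congr 1
  have hndb : (d.getD b PySem.Dict.empty).keys.Nodup := by
    rw [hin b]; exact pvInit_getD_nodup_keys vs b
  rw [PySem.Dict.items_eq_map_keys _ hndb 0, hin b]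
  rfl

-- ===== VERDICT (by name: the statement is the Claim_ definition above) =====
theorem condorcet_spec : Claim_equal_condorcet := by
  unfold Claim_equal_condorcet Spec_condorcet
  intro lineups variants _
  rw [condorcet_eq, condorcet_alt_eq,
    pv_items_of_shape variants _ (pvShape_A variants (PySem.Dict.ofList lineups).items),
    pv_items_of_shape variants _ (pvShape_Bfold variants (PySem.Dict.ofList lineups).items)]
  apply List.map_congr_left
  intro b _
  congr 1
  apply List.map_congr_left
  intro c _
  congr 1
  rw [pvVal_A, pvVal_B]
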